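-- pv_equiv track=rewrite | github.com/Braga451/simple-python-crypto | main.py | generateCipher
-- ===== SOURCE A (Python) =====
-- def generateCipher(times_to_roll : int = 1) -> dict:
--     cipher = [x for x in range(1, 27)]
--     letters = [chr(letter) for letter in range(97, 123)]
--     dict_crypt = {}
--     rolls_remains = times_to_roll
--     while(rolls_remains > 0):
--         for index in range(len(cipher)):
--             cipher[index] += 1
--             if(cipher[index] > 26):
--                 cipher[index] = 1
--         rolls_remains -= 1
--     for index in range(len(letters)):
--         dict_crypt[letters[index]] = cipher[index]
--     return dict_crypt
-- ===== SOURCE B (Python) =====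
-- def generateCipher(times_to_roll: int = 1) -> dict:
--     shift = max(0, times_to_roll) % 26
--     return {chr(97 + i): (i + shift) % 26 + 1 for i in range(26)}
-- ===== Notes on version B (the rewrite author's own statement) =====
-- stated objective: faster
-- what changed: Replaced the repeated roll-and-wrap passes over the whole cipher wheel (one pass per requested roll) by a single comprehension computing each letter's value directly with modular arithmetic.
import Mathlib
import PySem

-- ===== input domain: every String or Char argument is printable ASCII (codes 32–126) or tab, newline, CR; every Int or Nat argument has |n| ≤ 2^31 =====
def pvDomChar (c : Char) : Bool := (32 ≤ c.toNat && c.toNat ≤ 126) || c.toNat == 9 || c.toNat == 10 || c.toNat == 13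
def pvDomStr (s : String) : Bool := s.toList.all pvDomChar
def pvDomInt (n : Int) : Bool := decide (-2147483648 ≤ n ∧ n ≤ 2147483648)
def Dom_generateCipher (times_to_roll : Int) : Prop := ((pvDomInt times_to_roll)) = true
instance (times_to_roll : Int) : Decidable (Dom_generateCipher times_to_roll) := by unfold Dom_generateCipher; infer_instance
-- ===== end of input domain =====

-- B replaces A's repeated roll-the-wheel loop (times_to_roll passes over all 26 slots)
-- by one direct modular-arithmetic comprehension; proved to return the same association list.


-- ===== PORT A =====
-- one pass of the inner 'for index in range(len(cipher))' loop: each slot is incremented and wrapped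
def pvRollOnce (c : List Int) : List Int :=
  c.map (fun x => if x + 1 > 26 then 1 else x + 1)

-- the 'while rolls_remains > 0' loop, fuel = number of remaining rolls
def pvRollLoop : Nat → List Int → List Int
  | 0, c => c
  | n + 1, c => pvRollLoop n (pvRollOnce c)

def generateCipher (times_to_roll : Int) : List (String × Int) :=
  let cipher0 := PySem.List.pyRange 1 27 1
  let letters := (PySem.List.pyRange 97 123 1).map (fun n => String.ofList [Char.ofNat n.toNat])
  let cipher := pvRollLoop times_to_roll.toNat cipher0
  ((PySem.List.pyRange 0 (letters.length : Int) 1).foldl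
      (fun d idx =>
        d.insert (PySem.List.pyGetD letters idx "") (PySem.List.pyGetD cipher idx 0))
      (PySem.Dict.empty : PySem.Dict String Int)).items

-- ===== PORT B =====
def generateCipher_alt (times_to_roll : Int) : List (String × Int) :=
  let shift := PySem.Int.mod (max 0 times_to_roll) 26
  (List.range 26).map (fun i =>
    (String.ofList [Char.ofNat (97 + i)], PySem.Int.mod ((i : Int) + shift) 26 + 1))

-- ===== PRECONDITION & SPEC =====
def Spec_generateCipher (times_to_roll : Int) (out : List (String × Int)) : Prop := out = generateCipher_alt times_to_roll
instance (times_to_roll : Int) (out : List (String × Int)) : Decidable (Spec_generateCipher times_to_roll out) := by unfold Spec_generateCipher; infer_instance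

-- ===== CLAIM (what is proved, stated in full; the proofs are below) =====
def Claim_equal_generateCipher : Prop := ∀ (times_to_roll : Int), Dom_generateCipher times_to_roll → Spec_generateCipher times_to_roll (generateCipher times_to_roll)

-- ===== LEMMAS AND PROOFS =====

-- the cipher wheel after t completed rolls
def pvWheel (t : Nat) : List Int :=
  (List.range 26).map (fun i => (((i + t) % 26 : Nat) : Int) + 1)

lemma pvRollOnce_wheel (t : Nat) : pvRollOnce (pvWheel t) = pvWheel (t + 1) := by
  simp only [pvRollOnce, pvWheel, List.map_map]
  refine List.map_congr_left (fun i hi => ?_)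
  have h1 : (i + t) % 26 < 26 := Nat.mod_lt _ (by omega)
  simp only [Function.comp]
  split_ifs with h <;> omega

lemma pvRollLoop_wheel (n t : Nat) : pvRollLoop n (pvWheel t) = pvWheel (t + n) := by
  induction n generalizing t with
  | zero => simp [pvRollLoop]
  | succ m ih => rw [pvRollLoop, pvRollOnce_wheel, ih]; ring_nf

lemma pvWheel_zero : PySem.List.pyRange 1 27 1 = pvWheel 0 := by
  rw [PySem.List.pyRange_one]
  simp only [pvWheel]
  norm_num
  refine List.map_congr_left (fun i hi => ?_)
  have : i < 26 := by simpa using List.mem_range.mp hi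
  omega

lemma pvWheel_mod (t : Nat) : pvWheel t = pvWheel (t % 26) := by
  simp only [pvWheel]
  refine List.map_congr_left (fun i hi => ?_)
  have : (i + t) % 26 = (i + t % 26) % 26 := by omega
  rw [this]

lemma pvShift_eq (t : Int) :
    PySem.Int.mod (max 0 t) 26 = ((t.toNat % 26 : Nat) : Int) := by
  have h : max 0 t = ((t.toNat : Nat) : Int) := by omega
  rw [h]
  exact_mod_cast PySem.Int.mod_natCast t.toNat 26

-- with the wheel reduced mod 26, both sides are closed 26-element lists: check all 26 residues
lemma pvMain (r : Nat) (hr : r < 26) :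
    ((PySem.List.pyRange 0
        (((PySem.List.pyRange 97 123 1).map (fun n => String.ofList [Char.ofNat n.toNat])).length : Int) 1).foldl
      (fun d idx =>
        d.insert (PySem.List.pyGetD ((PySem.List.pyRange 97 123 1).map (fun n => String.ofList [Char.ofNat n.toNat])) idx "")
                 (PySem.List.pyGetD (pvWheel r) idx 0))
      (PySem.Dict.empty : PySem.Dict String Int)).items
    = (List.range 26).map (fun i =>
        (String.ofList [Char.ofNat (97 + i)], PySem.Int.mod ((i : Int) + ((r : Nat) : Int)) 26 + 1)) := by
  interval_cases r <;> decide

-- ===== VERDICT (by name: the statement is the Claim_ definition above) =====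
theorem generateCipher_spec : Claim_equal_generateCipher := by
  intro t _
  show generateCipher t = generateCipher_alt t
  simp only [generateCipher, generateCipher_alt]
  rw [pvWheel_zero, pvRollLoop_wheel, pvShift_eq]
  have h0 : (0 : Nat) + t.toNat = t.toNat := by omega
  rw [h0, pvWheel_mod]
  exact pvMain (t.toNat % 26) (Nat.mod_lt _ (by omega))
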